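-- pv_equiv track=rewrite | github.com/2274802010922/vaipe-contextual-pill-recognition | make_prescription_split.py | repair_unseen_labels
-- ===== SOURCE A (Python) =====
-- from typing import Dict, List, Set, Tuple
--
-- def label_union(keys: Set[str], pres_to_labels: Dict[str, Set[int]]) -> Set[int]:
--     labels = set()
--     for key in keys:
--         labels.update(pres_to_labels.get(key, set()))
--     return labels
--
-- def repair_unseen_labels(
--     train_keys: Set[str],
--     val_keys: Set[str],
--     test_keys: Set[str],
--     pres_to_labels: Dict[str, Set[int]],
-- ):
--     """
--     Nếu val/test có nhãn mà train chưa có, dời prescription chứa nhãn đó sang train.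
--     Vẫn bảo đảm không chồng chéo vì prescription bị remove khỏi val/test trước khi thêm vào train.
--     """
--     changed = True
--
--     while changed:
--         changed = False
--
--         train_labels = label_union(train_keys, pres_to_labels)
--         val_labels = label_union(val_keys, pres_to_labels)
--         test_labels = label_union(test_keys, pres_to_labels)
--
--         missing_val = sorted(list(val_labels - train_labels))
--         missing_test = sorted(list(test_labels - train_labels))
--
--         for label in missing_val:
--             candidates = [k for k in val_keys if label in pres_to_labels.get(k, set())]
--             if len(candidates) > 0:
--                 move_key = sorted(candidates)[0]
--                 val_keys.remove(move_key)
--                 train_keys.add(move_key)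
--                 changed = True
--
--         train_labels = label_union(train_keys, pres_to_labels)
--
--         for label in missing_test:
--             candidates = [k for k in test_keys if label in pres_to_labels.get(k, set())]
--             if len(candidates) > 0:
--                 move_key = sorted(candidates)[0]
--                 test_keys.remove(move_key)
--                 train_keys.add(move_key)
--                 changed = True
--
--     return train_keys, val_keys, test_keys
-- ===== SOURCE B (Python) =====
-- def repair_unseen_labels(
--     train_keys,
--     val_keys,
--     test_keys,
--     pres_to_labels,
-- ):
--     # One pass suffices: both missing-label lists are computed against the
--     # initial train labels, and each missing label ends up covered by train
--     # after its turn (its chosen holder moves, or all holders already moved),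
--     # so A's second while-iteration never changes anything.  B therefore does
--     # a single staged pass over (val, test), picking each move with min().
--     train_labels = {l for k in train_keys for l in pres_to_labels.get(k, set())}
--     for src in (val_keys, test_keys):
--         missing = sorted({l for k in src for l in pres_to_labels.get(k, set())} - train_labels)
--         for label in missing:
--             move = min((k for k in src if label in pres_to_labels.get(k, set())), default=None)
--             if move is not None:
--                 src.remove(move)
--                 train_keys.add(move)
--     return train_keys, val_keys, test_keys
-- ===== Notes on version B (the rewrite author's own statement) =====
-- stated objective: simpler
-- what changed: B drops A's 'while changed' fixpoint loop entirely (proving A's second iteration is always a no-op): it computes the train label set and each split's missing labels once via set comprehensions and does a single staged pass over (val, test), picking each move with min() over a generator instead of A's per-pass label_union recomputations and sort-then-index candidate selection.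
import Mathlib
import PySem

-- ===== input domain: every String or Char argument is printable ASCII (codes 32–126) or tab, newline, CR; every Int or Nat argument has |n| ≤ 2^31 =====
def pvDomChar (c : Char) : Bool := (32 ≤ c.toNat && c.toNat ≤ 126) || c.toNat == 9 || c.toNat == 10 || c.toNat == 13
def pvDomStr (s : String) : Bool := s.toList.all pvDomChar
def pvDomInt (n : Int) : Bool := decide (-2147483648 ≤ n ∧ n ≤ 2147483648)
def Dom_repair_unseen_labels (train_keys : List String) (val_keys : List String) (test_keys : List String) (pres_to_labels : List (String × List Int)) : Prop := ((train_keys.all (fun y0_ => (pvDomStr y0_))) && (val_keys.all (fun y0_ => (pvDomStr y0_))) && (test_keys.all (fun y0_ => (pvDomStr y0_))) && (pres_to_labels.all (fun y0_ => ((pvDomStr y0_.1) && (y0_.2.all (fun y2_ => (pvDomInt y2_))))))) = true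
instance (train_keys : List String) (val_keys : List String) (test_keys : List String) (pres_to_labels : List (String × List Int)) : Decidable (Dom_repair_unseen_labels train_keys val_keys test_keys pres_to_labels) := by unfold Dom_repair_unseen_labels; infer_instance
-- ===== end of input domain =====

-- B replaces A's fixpoint iteration (while changed: recompute all label unions, re-scan,
-- sort candidates) by ONE staged pass over (val, test): both missing-label lists are read
-- against the initial train labels — exactly what A's first iteration does — and A's later
-- iterations provably never change anything; each move is picked with min() instead of
-- sorting the candidates. Objective: simpler (no while loop, no re-scans).
-- A mutates its set arguments in place and returns them; the equivalence proved here is about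
-- the RETURN value only (B performs the same mutations in Python).

-- ===== PORT A =====

-- pres_to_labels.get(k, set())  (the lookup expression both Pythons share)
def pvGetLabels (ptl : List (String × List Int)) (k : String) : List Int :=
  PySem.Dict.getD (PySem.Dict.mk ptl) k []

-- label_union(keys, pres_to_labels)
def pvLabelUnion (keys : List String) (ptl : List (String × List Int)) : PySem.Set Int :=
  keys.foldl (fun labels k => PySem.Set.update labels (pvGetLabels ptl k)) []

-- 'for label in missing: candidates = [...]; if len > 0: move sorted(candidates)[0]'.
-- set.remove is ported as Set.discard: the removed key is always a member (it comes from
-- candidates ⊆ src), where remove and discard coincide exactly.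
def pvMovePassA (ptl : List (String × List Int)) (missing : List Int)
    (src train : List String) (changed : Bool) : List String × List String × Bool :=
  match missing with
  | [] => (src, train, changed)
  | label :: rest =>
    let candidates := src.filter (fun k => (pvGetLabels ptl k).contains label)
    if candidates.length > 0 then
      -- sorted(candidates)[0]; candidates is nonempty here, so headD is exact
      let move_key := (PySem.List.sorted candidates (fun x => x) false).headD ""
      pvMovePassA ptl rest (PySem.Set.discard src move_key) (PySem.Set.add train move_key) true
    else
      pvMovePassA ptl rest src train changed

-- head of sorted(xs) is an element of xs (used for termination and the main proof)
theorem pvSortedHeadDMem (xs : List String) (h : xs ≠ []) :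
    (PySem.List.sorted xs (fun x => x) false).headD "" ∈ xs := by
  cases hs : PySem.List.sorted xs (fun x => x) false with
  | nil => exact absurd ((PySem.List.sorted_eq_nil_iff xs _ false).mp hs) h
  | cons m t =>
    have hm : m ∈ PySem.List.sorted xs (fun x => x) false := by
      rw [hs]; exact List.mem_cons_self
    simpa using (PySem.List.mem_sorted xs _ false m).mp hm

theorem pvDiscardLenLe {α : Type} [BEq α] (s : PySem.Set α) (x : α) :
    (PySem.Set.discard s x).length ≤ s.length := by
  simp only [PySem.Set.discard]
  exact List.length_filter_le _ _

theorem pvDiscardLenLt {α : Type} [BEq α] [LawfulBEq α] (s : PySem.Set α) (x : α) (h : x ∈ s) :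
    (PySem.Set.discard s x).length < s.length := by
  simp only [PySem.Set.discard]
  exact List.length_filter_lt_length_iff_exists.mpr ⟨x, h, by simp⟩

theorem pvMovePassA_len (ptl : List (String × List Int)) (missing : List Int)
    (src train : List String) (changed : Bool) :
    (pvMovePassA ptl missing src train changed).1.length ≤ src.length ∧
      ((pvMovePassA ptl missing src train changed).2.2 = true →
        changed = true ∨ (pvMovePassA ptl missing src train changed).1.length < src.length) := by
  induction missing generalizing src train changed with
  | nil => simp [pvMovePassA]
  | cons label rest ih =>
    rw [pvMovePassA]
    by_cases hp : (src.filter (fun k => (pvGetLabels ptl k).contains label)).length > 0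
    · simp only [hp, if_true]
      have hne : src.filter (fun k => (pvGetLabels ptl k).contains label) ≠ [] := by
        intro hnil; rw [hnil] at hp; simp at hp
      have hmem : (PySem.List.sorted (src.filter (fun k => (pvGetLabels ptl k).contains label))
          (fun x => x) false).headD "" ∈ src :=
        List.mem_of_mem_filter (pvSortedHeadDMem _ hne)
      have hih := ih (PySem.Set.discard src
          ((PySem.List.sorted (src.filter (fun k => (pvGetLabels ptl k).contains label))
            (fun x => x) false).headD ""))
        (PySem.Set.add train
          ((PySem.List.sorted (src.filter (fun k => (pvGetLabels ptl k).contains label))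
            (fun x => x) false).headD "")) true
      exact ⟨le_trans hih.1 (pvDiscardLenLe _ _),
        fun _ => Or.inr (lt_of_le_of_lt hih.1 (pvDiscardLenLt _ _ hmem))⟩
    · simp only [hp, if_false]
      exact ih src train changed

-- the 'while changed' loop of A
def pvRepairA (ptl : List (String × List Int)) (train val test : List String) :
    List String × List String × List String :=
  let train_labels := pvLabelUnion train ptl
  let val_labels := pvLabelUnion val ptl
  let test_labels := pvLabelUnion test ptl
  let missing_val := PySem.List.sorted (PySem.Set.diff val_labels train_labels) (fun x => x) false
  let missing_test := PySem.List.sorted (PySem.Set.diff test_labels train_labels) (fun x => x) false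
  let r1 := pvMovePassA ptl missing_val val train false
  let r2 := pvMovePassA ptl missing_test test r1.2.1 r1.2.2
  if h : r2.2.2 = true then
    pvRepairA ptl r2.2.1 r1.1 r2.1
  else
    (r2.2.1, r1.1, r2.1)
termination_by val.length + test.length
decreasing_by
  have h1 : r1.1.length ≤ val.length ∧ (r1.2.2 = true → false = true ∨ r1.1.length < val.length) :=
    pvMovePassA_len ptl missing_val val train false
  have h2 : r2.1.length ≤ test.length ∧ (r2.2.2 = true → r1.2.2 = true ∨ r2.1.length < test.length) :=
    pvMovePassA_len ptl missing_test test r1.2.1 r1.2.2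
  show r1.1.length + r2.1.length < val.length + test.length
  rcases h2.2 h with hc | hlt
  · rcases h1.2 hc with hf | hlt1
    · simp at hf
    · omega
  · omega

def repair_unseen_labels (train_keys : List String) (val_keys : List String) (test_keys : List String) (pres_to_labels : List (String × List Int)) : List String × List String × List String :=
  pvRepairA pres_to_labels train_keys val_keys test_keys

-- ===== PORT B =====

-- the body of 'for label in missing': move = min((k for k in src if …), default=None); …
-- (state is the pair (src, train_keys); set.remove again ported as Set.discard on a member)
def pvMoveB (ptl : List (String × List Int)) (st : List String × List String) (label : Int) :
    List String × List String :=
  match PySem.List.min? (st.1.filter (fun k => (pvGetLabels ptl k).contains label)) (fun x => x) with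
  | some move => (PySem.Set.discard st.1 move, PySem.Set.add st.2 move)
  | none => st

-- one iteration of 'for src in (val_keys, test_keys)':
-- missing = sorted({l for k in src for l in get(k)} - train_labels), then the label loop
def pvFixSplit (ptl : List (String × List Int)) (train_labels : PySem.Set Int)
    (src train : List String) : List String × List String :=
  (PySem.List.sorted
      (PySem.Set.diff (PySem.Set.ofList (src.flatMap (pvGetLabels ptl))) train_labels)
      (fun x => x) false).foldl (pvMoveB ptl) (src, train)

def repair_unseen_labels_alt (train_keys : List String) (val_keys : List String) (test_keys : List String) (pres_to_labels : List (String × List Int)) : List String × List String × List String :=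
  -- train_labels = {l for k in train_keys for l in pres_to_labels.get(k, set())}
  let train_labels := PySem.Set.ofList (train_keys.flatMap (pvGetLabels pres_to_labels))
  let r1 := pvFixSplit pres_to_labels train_labels val_keys train_keys
  let r2 := pvFixSplit pres_to_labels train_labels test_keys r1.2
  (r2.2, r1.1, r2.1)

-- ===== PRECONDITION & SPEC =====

def Spec_repair_unseen_labels (train_keys : List String) (val_keys : List String) (test_keys : List String) (pres_to_labels : List (String × List Int)) (out : List String × List String × List String) : Prop := out = repair_unseen_labels_alt train_keys val_keys test_keys pres_to_labels
instance (train_keys : List String) (val_keys : List String) (test_keys : List String) (pres_to_labels : List (String × List Int)) (out : List String × List String × List String) : Decidable (Spec_repair_unseen_labels train_keys val_keys test_keys pres_to_labels out) := by unfold Spec_repair_unseen_labels; infer_instance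

-- ===== CLAIM (what is proved, stated in full; the proofs are below) =====
def Claim_equal_repair_unseen_labels : Prop := ∀ (train_keys : List String) (val_keys : List String) (test_keys : List String) (pres_to_labels : List (String × List Int)), Dom_repair_unseen_labels train_keys val_keys test_keys pres_to_labels → Spec_repair_unseen_labels train_keys val_keys test_keys pres_to_labels (repair_unseen_labels train_keys val_keys test_keys pres_to_labels)

-- ===== LEMMAS AND PROOFS =====

-- membership in a label-union fold
theorem pvMemUnionFold (ptl : List (String × List Int)) (keys : List String)
    (s : PySem.Set Int) (l : Int) :
    l ∈ keys.foldl (fun labels k => PySem.Set.update labels (pvGetLabels ptl k)) s ↔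
      l ∈ s ∨ ∃ k ∈ keys, l ∈ pvGetLabels ptl k := by
  induction keys generalizing s with
  | nil => simp
  | cons k ks ih =>
    simp only [List.foldl_cons, ih, PySem.Set.mem_update, List.mem_cons]
    constructor
    · rintro ((h | h) | ⟨k', hk', h⟩)
      · exact Or.inl h
      · exact Or.inr ⟨k, Or.inl rfl, h⟩
      · exact Or.inr ⟨k', Or.inr hk', h⟩
    · rintro (h | ⟨k', (rfl | hk'), h⟩)
      · exact Or.inl (Or.inl h)
      · exact Or.inl (Or.inr h)
      · exact Or.inr ⟨k', hk', h⟩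

theorem pvMemLabelUnion (ptl : List (String × List Int)) (keys : List String) (l : Int) :
    l ∈ pvLabelUnion keys ptl ↔ ∃ k ∈ keys, l ∈ pvGetLabels ptl k := by
  unfold pvLabelUnion
  simpa using pvMemUnionFold ptl keys [] l

theorem pvNodupUnionFold (ptl : List (String × List Int)) (keys : List String)
    (s : PySem.Set Int) (hs : s.Nodup) :
    (keys.foldl (fun labels k => PySem.Set.update labels (pvGetLabels ptl k)) s).Nodup := by
  induction keys generalizing s with
  | nil => exact hs
  | cons k ks ih => exact ih _ (PySem.Set.nodup_update _ _ hs)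

theorem pvNodupLabelUnion (ptl : List (String × List Int)) (keys : List String) :
    (pvLabelUnion keys ptl).Nodup :=
  pvNodupUnionFold ptl keys [] List.nodup_nil

-- label-union membership is monotone in the train set
theorem pvLabelUnionMono (ptl : List (String × List Int)) (t t' : List String)
    (hm : ∀ x ∈ t, x ∈ t') (l : Int) (hl : l ∈ pvLabelUnion t ptl) :
    l ∈ pvLabelUnion t' ptl := by
  obtain ⟨k, hk, hkl⟩ := (pvMemLabelUnion ptl t l).mp hl
  exact (pvMemLabelUnion ptl t' l).mpr ⟨k, hm k hk, hkl⟩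

-- B's min() pick IS A's sorted(candidates)[0] pick
theorem pvMinEqSortedHead (xs : List String) :
    PySem.List.min? xs (fun x => x) = (PySem.List.sorted xs (fun x => x) false).head? := by
  cases hs : PySem.List.sorted xs (fun x => x) false with
  | nil =>
    have hx : xs = [] := (PySem.List.sorted_eq_nil_iff xs _ false).mp hs
    subst hx
    rfl
  | cons m t =>
    have hxne : xs ≠ [] := by
      intro hx
      rw [hx, (PySem.List.sorted_eq_nil_iff ([] : List String) (fun x : String => x) false).mpr rfl] at hs
      exact absurd hs (by simp)
    cases hmin : PySem.List.min? xs (fun x => x) with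
    | none => exact absurd ((PySem.List.min?_eq_none_iff xs _).mp hmin) hxne
    | some m' =>
      have hm'mem : m' ∈ xs := PySem.List.min?_mem hmin
      have hmmem : m ∈ xs := by
        have : m ∈ PySem.List.sorted xs (fun x => x) false := by
          rw [hs]; exact List.mem_cons_self
        exact (PySem.List.mem_sorted xs _ false m).mp this
      have h1 : m ≤ m' := PySem.List.key_head_sorted_le _ _ hs m' hm'mem
      have h2 : m' ≤ m := PySem.List.min?_isMin hmin m hmmem
      simp [le_antisymm h2 h1]

-- one pass of B's label loop computes exactly A's pass (src and train components)
theorem pvPassEq (ptl : List (String × List Int)) (missing : List Int) :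
    ∀ (src train : List String) (ch : Bool),
      (missing.foldl (pvMoveB ptl) (src, train)).1 = (pvMovePassA ptl missing src train ch).1 ∧
      (missing.foldl (pvMoveB ptl) (src, train)).2 = (pvMovePassA ptl missing src train ch).2.1 := by
  induction missing with
  | nil => intro src train ch; exact ⟨rfl, rfl⟩
  | cons label rest ih =>
    intro src train ch
    rw [List.foldl_cons, pvMovePassA]
    show (rest.foldl (pvMoveB ptl) (pvMoveB ptl (src, train) label)).1 = _ ∧ _
    rw [pvMoveB]
    simp only []
    rw [pvMinEqSortedHead]
    cases hc : (PySem.List.sorted (src.filter (fun k => (pvGetLabels ptl k).contains label))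
        (fun x => x) false).head? with
    | none =>
      have hnil : src.filter (fun k => (pvGetLabels ptl k).contains label) = [] :=
        (PySem.List.sorted_eq_nil_iff _ _ false).mp (List.head?_eq_none_iff.mp hc)
      simp only [hnil, List.length_nil, gt_iff_lt, lt_irrefl, if_false]
      exact ih src train ch
    | some m =>
      have hmem : m ∈ PySem.List.sorted
          (src.filter (fun k => (pvGetLabels ptl k).contains label)) (fun x => x) false :=
        List.mem_of_mem_head? hc
      have hmcand : m ∈ src.filter (fun k => (pvGetLabels ptl k).contains label) :=
        (PySem.List.mem_sorted _ _ false m).mp hmem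
      have hlen : (src.filter (fun k => (pvGetLabels ptl k).contains label)).length > 0 :=
        List.length_pos_of_mem hmcand
      have hhead : (PySem.List.sorted
          (src.filter (fun k => (pvGetLabels ptl k).contains label))
          (fun x => x) false).headD "" = m := by
        rw [List.headD_eq_head?_getD, hc]; rfl
      simp only [hlen, if_true, hhead]
      exact ih (PySem.Set.discard src m) (PySem.Set.add train m) true

-- A's pass: the source shrinks (as a sublist), train-membership grows, and every processed
-- label is afterwards covered by train or held by no remaining source key
theorem pvPassCover (ptl : List (String × List Int)) (missing : List Int) :
    ∀ (src train : List String) (ch : Bool),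
      List.Sublist (pvMovePassA ptl missing src train ch).1 src ∧
      (∀ x ∈ train, x ∈ (pvMovePassA ptl missing src train ch).2.1) ∧
      (∀ l ∈ missing,
        (∃ k ∈ (pvMovePassA ptl missing src train ch).1, l ∈ pvGetLabels ptl k) →
          l ∈ pvLabelUnion (pvMovePassA ptl missing src train ch).2.1 ptl) := by
  induction missing with
  | nil =>
    intro src train ch
    exact ⟨List.Sublist.refl _, fun x hx => hx, fun l hl => absurd hl (List.not_mem_nil)⟩
  | cons label rest ih =>
    intro src train ch
    rw [pvMovePassA]
    by_cases hp : (src.filter (fun k => (pvGetLabels ptl k).contains label)).length > 0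
    · simp only [hp, if_true]
      have hne : src.filter (fun k => (pvGetLabels ptl k).contains label) ≠ [] := by
        intro hnil; rw [hnil] at hp; simp at hp
      set m := (PySem.List.sorted (src.filter (fun k => (pvGetLabels ptl k).contains label))
          (fun x => x) false).headD "" with hm
      have hmcand : m ∈ src.filter (fun k => (pvGetLabels ptl k).contains label) :=
        pvSortedHeadDMem _ hne
      have hml : label ∈ pvGetLabels ptl m := by
        have := (List.mem_filter.mp hmcand).2
        simpa using this
      obtain ⟨hsub, hmono, hcov⟩ := ih (PySem.Set.discard src m) (PySem.Set.add train m) true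
      refine ⟨hsub.trans (by simp only [PySem.Set.discard]; exact List.filter_sublist), ?_, ?_⟩
      · intro x hx
        exact hmono x ((PySem.Set.mem_add _ _ _).mpr (Or.inl hx))
      · intro l hl hex
        rcases List.mem_cons.mp hl with rfl | hrest
        · have hcur : l ∈ pvLabelUnion (PySem.Set.add train m) ptl :=
            (pvMemLabelUnion ptl _ l).mpr ⟨m, (PySem.Set.mem_add _ _ _).mpr (Or.inr rfl), hml⟩
          exact pvLabelUnionMono ptl _ _ hmono l hcur
        · exact hcov l hrest hex
    · simp only [hp, if_false]
      obtain ⟨hsub, hmono, hcov⟩ := ih src train ch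
      refine ⟨hsub, hmono, ?_⟩
      intro l hl hex
      rcases List.mem_cons.mp hl with rfl | hrest
      · obtain ⟨k, hk, hkl⟩ := hex
        have : k ∈ src.filter (fun k => (pvGetLabels ptl k).contains l) :=
          List.mem_filter.mpr ⟨hsub.subset hk, by simpa using hkl⟩
        exact absurd (List.length_pos_of_mem this) (by omega)
      · exact hcov l hrest hex

-- when both missing lists are empty, A's loop returns its state unchanged
theorem pvRepairA_stop (ptl : List (String × List Int)) (train val test : List String)
    (h1 : PySem.Set.diff (pvLabelUnion val ptl) (pvLabelUnion train ptl) = [])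
    (h2 : PySem.Set.diff (pvLabelUnion test ptl) (pvLabelUnion train ptl) = []) :
    pvRepairA ptl train val test = (train, val, test) := by
  rw [pvRepairA]
  have hs1 : PySem.List.sorted (PySem.Set.diff (pvLabelUnion val ptl) (pvLabelUnion train ptl))
      (fun x => x) false = [] := by
    rw [h1]; exact (PySem.List.sorted_eq_nil_iff _ _ false).mpr rfl
  have hs2 : PySem.List.sorted (PySem.Set.diff (pvLabelUnion test ptl) (pvLabelUnion train ptl))
      (fun x => x) false = [] := by
    rw [h2]; exact (PySem.List.sorted_eq_nil_iff _ _ false).mpr rfl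
  simp [hs1, hs2, pvMovePassA]

-- A's while loop equals its own first iteration: afterwards nothing is missing any more
theorem pvRepairA_one (ptl : List (String × List Int)) (train val test : List String) :
    pvRepairA ptl train val test =
      (let r1 := pvMovePassA ptl
          (PySem.List.sorted (PySem.Set.diff (pvLabelUnion val ptl) (pvLabelUnion train ptl))
            (fun x => x) false) val train false
       let r2 := pvMovePassA ptl
          (PySem.List.sorted (PySem.Set.diff (pvLabelUnion test ptl) (pvLabelUnion train ptl))
            (fun x => x) false) test r1.2.1 r1.2.2
       (r2.2.1, r1.1, r2.1)) := by
  rw [pvRepairA]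
  simp only []
  set mv := PySem.List.sorted (PySem.Set.diff (pvLabelUnion val ptl) (pvLabelUnion train ptl))
      (fun x => x) false with hmv
  set mt := PySem.List.sorted (PySem.Set.diff (pvLabelUnion test ptl) (pvLabelUnion train ptl))
      (fun x => x) false with hmt
  set r1 := pvMovePassA ptl mv val train false with hr1
  set r2 := pvMovePassA ptl mt test r1.2.1 r1.2.2 with hr2
  by_cases hch : r2.2.2 = true
  · simp only [dif_pos hch]
    obtain ⟨hsub1, hmono1, hcov1⟩ := pvPassCover ptl mv val train false
    obtain ⟨hsub2, hmono2, hcov2⟩ := pvPassCover ptl mt test r1.2.1 r1.2.2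
    rw [← hr1] at hsub1 hmono1 hcov1
    rw [← hr2] at hsub2 hmono2 hcov2
    apply pvRepairA_stop
    · -- every label still held in the remaining val keys is covered by the new train
      apply List.filter_eq_nil_iff.mpr
      intro l hl
      obtain ⟨k, hk, hkl⟩ := (pvMemLabelUnion ptl r1.1 l).mp hl
      have hlt2 : l ∈ pvLabelUnion r2.2.1 ptl := by
        by_cases hin : l ∈ pvLabelUnion train ptl
        · exact pvLabelUnionMono ptl _ _ hmono2 l (pvLabelUnionMono ptl _ _ hmono1 l hin)
        · have hlv : l ∈ pvLabelUnion val ptl :=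
            (pvMemLabelUnion ptl val l).mpr ⟨k, hsub1.subset hk, hkl⟩
          have hlmv : l ∈ mv := by
            rw [hmv, PySem.List.mem_sorted]
            exact (PySem.Set.mem_diff _ _ l).mpr ⟨hlv, hin⟩
          exact pvLabelUnionMono ptl _ _ hmono2 l (hcov1 l hlmv ⟨k, hk, hkl⟩)
      simpa [pysem] using hlt2
    · apply List.filter_eq_nil_iff.mpr
      intro l hl
      obtain ⟨k, hk, hkl⟩ := (pvMemLabelUnion ptl r2.1 l).mp hl
      have hlt2 : l ∈ pvLabelUnion r2.2.1 ptl := by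
        by_cases hin : l ∈ pvLabelUnion train ptl
        · exact pvLabelUnionMono ptl _ _ hmono2 l (pvLabelUnionMono ptl _ _ hmono1 l hin)
        · have hlv : l ∈ pvLabelUnion test ptl :=
            (pvMemLabelUnion ptl test l).mpr ⟨k, hsub2.subset hk, hkl⟩
          have hlmt : l ∈ mt := by
            rw [hmt, PySem.List.mem_sorted]
            exact (PySem.Set.mem_diff _ _ l).mpr ⟨hlv, hin⟩
          exact hcov2 l hlmt ⟨k, hk, hkl⟩
      simpa [pysem] using hlt2
  · simp only [dif_neg hch]

-- B's missing list (set comprehension minus the flatMap train set) IS A's missing list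
theorem pvMissEq (ptl : List (String × List Int)) (src train : List String) :
    PySem.List.sorted
        (PySem.Set.diff (PySem.Set.ofList (src.flatMap (pvGetLabels ptl)))
          (PySem.Set.ofList (train.flatMap (pvGetLabels ptl)))) (fun x => x) false
      = PySem.List.sorted
          (PySem.Set.diff (pvLabelUnion src ptl) (pvLabelUnion train ptl)) (fun x => x) false := by
  apply PySem.List.sorted_eq_sorted_of_perm _ _ _ (fun a b h => h)
  apply (List.perm_ext_iff_of_nodup
    (PySem.Set.nodup_diff _ _ (PySem.Set.nodup_ofList _))
    (PySem.Set.nodup_diff _ _ (pvNodupLabelUnion ptl src))).mpr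
  intro l
  simp only [PySem.Set.mem_diff, PySem.Set.mem_ofList, List.mem_flatMap, pvMemLabelUnion]

-- ===== VERDICT (by name: the statement is the Claim_ definition above) =====
theorem repair_unseen_labels_spec : Claim_equal_repair_unseen_labels := by
  intro train_keys val_keys test_keys pres_to_labels _hdom
  show repair_unseen_labels train_keys val_keys test_keys pres_to_labels
    = repair_unseen_labels_alt train_keys val_keys test_keys pres_to_labels
  unfold repair_unseen_labels repair_unseen_labels_alt pvFixSplit
  rw [pvRepairA_one]
  simp only [pvMissEq]
  obtain ⟨ha1, hb1⟩ := pvPassEq pres_to_labels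
    (PySem.List.sorted (PySem.Set.diff (pvLabelUnion val_keys pres_to_labels)
      (pvLabelUnion train_keys pres_to_labels)) (fun x => x) false)
    val_keys train_keys false
  obtain ⟨ha2, hb2⟩ := pvPassEq pres_to_labels
    (PySem.List.sorted (PySem.Set.diff (pvLabelUnion test_keys pres_to_labels)
      (pvLabelUnion train_keys pres_to_labels)) (fun x => x) false)
    test_keys
    ((PySem.List.sorted (PySem.Set.diff (pvLabelUnion val_keys pres_to_labels)
      (pvLabelUnion train_keys pres_to_labels)) (fun x => x) false).foldl
      (pvMoveB pres_to_labels) (val_keys, train_keys)).2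
    (pvMovePassA pres_to_labels
      (PySem.List.sorted (PySem.Set.diff (pvLabelUnion val_keys pres_to_labels)
        (pvLabelUnion train_keys pres_to_labels)) (fun x => x) false)
      val_keys train_keys false).2.2
  rw [hb1] at ha2 hb2
  simp only [ha1, hb1, ha2, hb2]
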